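-- pv_equiv track=rewrite | github.com/Bin0-D3v/BinoAgent | src/twitter_agent/agent.py | _enforce_hashtags
-- ===== SOURCE A (Python) =====
-- def _enforce_hashtags(text: str) -> str:
--     words = text.split()
--     new_words = []
--     hashtag_used = False
--     for word in words:
--         if word.startswith("#"):
--             if hashtag_used:
--                 continue
--             hashtag_used = True
--         new_words.append(word)
--     return " ".join(new_words)
-- ===== SOURCE B (Python) =====
-- def _enforce_hashtags(text: str) -> str:
--     words = text.split()
--     idx = next((i for i, w in enumerate(words) if w.startswith("#")), -1)
--     return " ".join(w for i, w in enumerate(words) if not w.startswith("#") or i == idx)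
-- ===== Notes on version B (the rewrite author's own statement) =====
-- stated objective: idiomatic
-- what changed: Replaces the running hashtag_used flag and accumulator list with a locate-then-filter decomposition: one search for the first hashtag index, then a single comprehension keeping non-hashtag words and the word at that index.
import Mathlib
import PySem

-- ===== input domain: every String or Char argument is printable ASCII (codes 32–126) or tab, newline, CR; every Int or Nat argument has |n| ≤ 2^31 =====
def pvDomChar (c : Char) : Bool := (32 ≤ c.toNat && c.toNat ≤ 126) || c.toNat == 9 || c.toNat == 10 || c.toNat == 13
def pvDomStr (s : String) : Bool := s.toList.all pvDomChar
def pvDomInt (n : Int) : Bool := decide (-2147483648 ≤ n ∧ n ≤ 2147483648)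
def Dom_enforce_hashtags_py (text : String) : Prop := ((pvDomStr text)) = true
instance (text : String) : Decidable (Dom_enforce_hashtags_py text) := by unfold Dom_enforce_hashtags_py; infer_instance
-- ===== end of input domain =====

-- B keeps only the first hashtag word by locating its index once, then filtering; same result, different decomposition (idiomatic).

-- ===== PORT A =====
-- one loop step of A: append the word unless it is a repeated hashtag; track hashtag_used
def ehStep (st : List String × Bool) (word : String) : List String × Bool :=
  if PySem.Str.startswith word "#" then
    if st.2 then st else (st.1 ++ [word], true)
  else (st.1 ++ [word], st.2)

def enforce_hashtags_py (text : String) : String :=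
  let words := PySem.Str.split₀ text
  let res := words.foldl ehStep ([], false)
  PySem.Str.join " " res.1

-- ===== PORT B =====
-- idx = next((i for i,w in enumerate(words) if w.startswith("#")), -1)
def ehFirstIdx (words : List String) (s : Int) : Int :=
  ((PySem.List.enumerate words s).findSome?
    (fun p => if PySem.Str.startswith p.2 "#" then some p.1 else none)).getD (-1)

def enforce_hashtags_py_alt (text : String) : String :=
  let words := PySem.Str.split₀ text
  let idx := ehFirstIdx words 0
  PySem.Str.join " "
    (((PySem.List.enumerate words 0).filter
        (fun p => !PySem.Str.startswith p.2 "#" || p.1 == idx)).map Prod.snd)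

-- ===== PRECONDITION & SPEC =====
def Spec_enforce_hashtags_py (text : String) (out : String) : Prop := out = enforce_hashtags_py_alt text
instance (text : String) (out : String) : Decidable (Spec_enforce_hashtags_py text out) := by unfold Spec_enforce_hashtags_py; infer_instance

-- ===== CLAIM (what is proved, stated in full; the proofs are below) =====
def Claim_equal_enforce_hashtags_py : Prop := ∀ (text : String), Dom_enforce_hashtags_py text → Spec_enforce_hashtags_py text (enforce_hashtags_py text)

-- ===== LEMMAS AND PROOFS =====

-- once hashtag_used is true, A's flag stays true and it collects exactly the non-hashtag words;
-- B's filter over indices ≥ s with idx < s keeps exactly the same words.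
theorem eh_loop_true (ws : List String) (acc : List String) (s idx : Int) (h : idx < s) :
    ws.foldl ehStep (acc, true) =
      (acc ++ ((PySem.List.enumerate ws s).filter
        (fun p => !PySem.Str.startswith p.2 "#" || p.1 == idx)).map Prod.snd, true) := by
  induction ws generalizing acc s with
  | nil => simp [PySem.List.enumerate_nil]
  | cons w rest ih =>
    by_cases hw : PySem.Chars.startswith w.toList ['#'] = true
    · have hne : ((s : Int) == idx) = false := by simp; omega
      simp [ehStep, PySem.Str.startswith, hw, hne, PySem.List.enumerate_cons,
        ih acc (s + 1) (by omega)]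
    · simp only [Bool.not_eq_true] at hw
      simp [ehStep, PySem.Str.startswith, hw, PySem.List.enumerate_cons,
        ih (acc ++ [w]) (s + 1) (by omega)]

-- before any hashtag was seen, A collects the same words as B's filter with the first hashtag index
theorem eh_loop_false (ws : List String) (acc : List String) (s : Int) :
    (ws.foldl ehStep (acc, false)).1 =
      acc ++ ((PySem.List.enumerate ws s).filter
        (fun p => !PySem.Str.startswith p.2 "#" || p.1 == ehFirstIdx ws s)).map Prod.snd := by
  induction ws generalizing acc s with
  | nil => simp [PySem.List.enumerate_nil]
  | cons w rest ih =>
    by_cases hw : PySem.Chars.startswith w.toList ['#'] = true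
    · have ht := congrArg Prod.fst (eh_loop_true rest (acc ++ [w]) (s + 1) s (by omega))
      simp [ehStep, ehFirstIdx, PySem.Str.startswith, hw, PySem.List.enumerate_cons, ht]
    · simp only [Bool.not_eq_true] at hw
      have := ih (acc ++ [w]) (s + 1)
      simp only [ehFirstIdx, PySem.Str.startswith] at this
      simp [ehStep, ehFirstIdx, PySem.Str.startswith, hw, PySem.List.enumerate_cons,
        List.filter_cons, this]

-- ===== VERDICT (by name: the statement is the Claim_ definition above) =====
theorem enforce_hashtags_py_spec : Claim_equal_enforce_hashtags_py := by
  intro text _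
  unfold Spec_enforce_hashtags_py enforce_hashtags_py enforce_hashtags_py_alt
  simp [eh_loop_false (PySem.Str.split₀ text) [] 0]
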